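-- pv_equiv track=rewrite | github.com/Pronting/eisenhower | backend/app/agent/summarize.py | _build_task_text
-- ===== SOURCE A (Python) =====
-- from typing import Optional
--
-- QUADRANT_NAMES = {
--     "q1": "重要紧急",
--     "q2": "重要不紧急",
--     "q3": "紧急不重要",
--     "q4": "不紧急不重要",
-- }
--
-- def _build_task_text(tasks: list[dict], status_filter: Optional[str] = None) -> str:
--     """Build a text representation of tasks grouped by quadrant."""
--     by_quadrant = {"q1": [], "q2": [], "q3": [], "q4": []}
--     for t in tasks:
--         q = t.get("quadrant", "q4")
--         if q not in by_quadrant: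
--             q = "q4"
--         if status_filter and t.get("status") != status_filter:
--             continue
--         status_mark = "✓" if t.get("status") == "completed" else "○"
--         by_quadrant[q].append(f"  [{status_mark}] {t.get('title', '')}")
--
--     lines = []
--     for q in ["q1", "q2", "q3", "q4"]:
--         label = QUADRANT_NAMES[q]
--         count = len(by_quadrant[q])
--         lines.append(f"{label}（{count}个）：")
--         lines.extend(by_quadrant[q][:8])  # limit to 8 per quadrant
--     return "\n".join(lines)
-- ===== SOURCE B (Python) =====
-- from typing import Optional
--
-- def _build_task_text(tasks: list, status_filter: Optional[str] = None) -> str: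
--     """Four filtering passes, one per quadrant in fixed order; no bucketing dict."""
--     lines = []
--     for q, label in [("q1", "重要紧急"), ("q2", "重要不紧急"),
--                      ("q3", "紧急不重要"), ("q4", "不紧急不重要")]:
--         bucket = []
--         for t in tasks:
--             eq = t.get("quadrant", "q4")
--             if eq not in ("q1", "q2", "q3", "q4"):
--                 eq = "q4"
--             if eq != q:
--                 continue
--             if status_filter and t.get("status") != status_filter:
--                 continue
--             mark = "✓" if t.get("status") == "completed" else "○"
--             bucket.append(f"  [{mark}] {t.get('title', '')}")
--         lines.append(f"{label}（{len(bucket)}个）：")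
--         lines.extend(bucket[:8])
--     return "\n".join(lines)
-- ===== Notes on version B (the rewrite author's own statement) =====
-- stated objective: alternative
-- what changed: Replaced the single bucketing pass into a by_quadrant dict with four per-quadrant filtering scans over the task list in the fixed quadrant order, building each quadrant's lines directly.
import Mathlib
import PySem

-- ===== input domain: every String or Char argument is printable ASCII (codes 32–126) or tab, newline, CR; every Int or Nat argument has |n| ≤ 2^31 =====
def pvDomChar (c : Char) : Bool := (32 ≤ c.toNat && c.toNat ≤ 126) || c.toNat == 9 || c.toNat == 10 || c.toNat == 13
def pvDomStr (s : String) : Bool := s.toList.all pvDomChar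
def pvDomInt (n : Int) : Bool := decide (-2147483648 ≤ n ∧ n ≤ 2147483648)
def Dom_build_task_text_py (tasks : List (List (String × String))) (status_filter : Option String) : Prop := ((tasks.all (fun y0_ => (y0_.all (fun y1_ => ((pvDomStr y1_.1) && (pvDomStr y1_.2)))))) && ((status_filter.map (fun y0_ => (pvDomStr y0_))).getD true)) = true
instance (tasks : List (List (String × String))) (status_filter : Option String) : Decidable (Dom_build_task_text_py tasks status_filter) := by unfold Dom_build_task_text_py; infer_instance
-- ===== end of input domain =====

-- B replaces A's single bucketing pass into a dict with four per-quadrant filtering scans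
-- in the fixed quadrant order (alternative decomposition, same output).

-- ===== PORT A =====
-- shared helpers: these port expressions that appear verbatim in BOTH Pythons
-- Python truthiness of the Optional[str] status_filter: None and "" are falsy
def pvTruthy (sf : Option String) : Bool :=
  match sf with
  | none => false
  | some s => s ≠ ""

-- 'if status_filter and t.get("status") != status_filter: continue'
def pvSkip (sf : Option String) (t : List (String × String)) : Bool :=
  pvTruthy sf && (PySem.Dict.get? (PySem.Dict.mk t) "status" != sf)

-- '"✓" if t.get("status") == "completed" else "○"' and the f-string line
def pvLine (t : List (String × String)) : String :=
  let mark := if PySem.Dict.get? (PySem.Dict.mk t) "status" == some "completed" then "✓" else "○"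
  "  [" ++ mark ++ "] " ++ PySem.Dict.getD (PySem.Dict.mk t) "title" ""

def QUADRANT_NAMES : PySem.Dict String String :=
  PySem.Dict.ofList [("q1", "重要紧急"), ("q2", "重要不紧急"), ("q3", "紧急不重要"), ("q4", "不紧急不重要")]

def build_task_text_py (tasks : List (List (String × String))) (status_filter : Option String) : String :=
  let by_quadrant : PySem.Dict String (List String) :=
    PySem.Dict.ofList [("q1", []), ("q2", []), ("q3", []), ("q4", [])]
  let by_quadrant := tasks.foldl (fun d t =>
    let q := PySem.Dict.getD (PySem.Dict.mk t) "quadrant" "q4"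
    let q := if d.contains q then q else "q4"
    if pvSkip status_filter t then d
    else d.modify q [] (fun l => l ++ [pvLine t])) by_quadrant
  let lines := (["q1", "q2", "q3", "q4"] : List String).foldl (fun acc q =>
    -- QUADRANT_NAMES[q]: exact here since every q looped over is a key of QUADRANT_NAMES
    let label := PySem.Dict.getD QUADRANT_NAMES q ""
    let count := (by_quadrant.getD q []).length
    (acc ++ [label ++ "（" ++ PySem.Int.toStr (Int.ofNat count) ++ "个）："])
      ++ PySem.List.slice (by_quadrant.getD q []) none (some 8)) []
  PySem.Str.join "\n" lines

-- ===== PORT B =====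
def build_task_text_py_alt (tasks : List (List (String × String))) (status_filter : Option String) : String :=
  let lines := ([("q1", "重要紧急"), ("q2", "重要不紧急"), ("q3", "紧急不重要"), ("q4", "不紧急不重要")]
      : List (String × String)).foldl (fun acc p =>
    let bucket := tasks.foldl (fun b t =>
      let eq0 := PySem.Dict.getD (PySem.Dict.mk t) "quadrant" "q4"
      let eq1 := if (["q1", "q2", "q3", "q4"] : List String).contains eq0 then eq0 else "q4"
      if eq1 ≠ p.1 then b
      else if pvSkip status_filter t then b
      else b ++ [pvLine t]) []
    (acc ++ [p.2 ++ "（" ++ PySem.Int.toStr (Int.ofNat bucket.length) ++ "个）："])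
      ++ PySem.List.slice bucket none (some 8)) []
  PySem.Str.join "\n" lines

-- ===== PRECONDITION & SPEC =====
def Spec_build_task_text_py (tasks : List (List (String × String))) (status_filter : Option String) (out : String) : Prop := out = build_task_text_py_alt tasks status_filter
instance (tasks : List (List (String × String))) (status_filter : Option String) (out : String) : Decidable (Spec_build_task_text_py tasks status_filter out) := by unfold Spec_build_task_text_py; infer_instance

-- ===== CLAIM (what is proved, stated in full; the proofs are below) =====
def Claim_equal_build_task_text_py : Prop := ∀ (tasks : List (List (String × String))) (status_filter : Option String), Dom_build_task_text_py tasks status_filter → Spec_build_task_text_py tasks status_filter (build_task_text_py tasks status_filter)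

-- ===== LEMMAS AND PROOFS =====

-- the effective quadrant of a task (both programs compute it, A against the dict's keys)
def pvEff (t : List (String × String)) : String :=
  if (["q1", "q2", "q3", "q4"] : List String).contains (PySem.Dict.getD (PySem.Dict.mk t) "quadrant" "q4")
  then PySem.Dict.getD (PySem.Dict.mk t) "quadrant" "q4" else "q4"

lemma pvEff_mem (t : List (String × String)) :
    pvEff t ∈ (["q1", "q2", "q3", "q4"] : List String) := by
  unfold pvEff
  split
  · next h => simpa using h
  · simp

-- A's bucketing loop, read off per key: getD c of the fold is getD c of the start
-- followed by the lines of the tasks whose effective quadrant is c and that pass the filter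
lemma loopA_getD (sf : Option String) :
    ∀ (ts : List (List (String × String))) (d : PySem.Dict String (List String))
      (_hk : d.keys = ["q1", "q2", "q3", "q4"]) (c : String),
      (ts.foldl (fun d t =>
        let q := PySem.Dict.getD (PySem.Dict.mk t) "quadrant" "q4"
        let q := if d.contains q then q else "q4"
        if pvSkip sf t then d
        else d.modify q [] (fun l => l ++ [pvLine t])) d).getD c []
      = d.getD c [] ++ ((ts.filter (fun t => pvEff t == c && !pvSkip sf t)).map pvLine) := by
  intro ts
  induction ts with
  | nil => intro d hk c; simp
  | cons t ts ih =>
    intro d hk c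
    have hcont : ∀ q : String, d.contains q = (["q1", "q2", "q3", "q4"] : List String).contains q := by
      intro q
      rw [PySem.Dict.contains_eq_decide_mem_keys, hk]
      simp
    simp only [List.foldl_cons, List.filter_cons]
    by_cases hs : pvSkip sf t = true
    · rw [if_pos hs, ih d hk c]
      simp [hs]
    · have hs' : pvSkip sf t = false := by simpa using hs
      rw [if_neg hs]
      have heff : (if d.contains (PySem.Dict.getD (PySem.Dict.mk t) "quadrant" "q4")
          then PySem.Dict.getD (PySem.Dict.mk t) "quadrant" "q4" else "q4") = pvEff t := by
        unfold pvEff; rw [hcont]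
      rw [heff]
      have hc2 : d.contains (pvEff t) = true := by
        rw [hcont]
        simpa [List.contains_iff_mem] using pvEff_mem t
      have hk' : (d.modify (pvEff t) [] (fun l => l ++ [pvLine t])).keys = ["q1", "q2", "q3", "q4"] := by
        rw [PySem.Dict.keys_modify, PySem.Dict.keys_insert_of_contains _ _ hc2]
        exact hk
      rw [ih _ hk' c, PySem.Dict.getD_modify]
      by_cases hcc : c = pvEff t
      · rw [if_pos hcc]
        simp [hcc, hs']
      · rw [if_neg hcc]
        have hb : (pvEff t == c) = false := by
          simp only [beq_eq_false_iff_ne]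
          exact fun h => hcc h.symm
        simp [hb, hs']

-- B's bucket loop for quadrant c is the same filter-map
lemma loopB_bucket (sf : Option String) (ts : List (List (String × String))) (c : String) :
    (ts.foldl (fun b t =>
      let eq0 := PySem.Dict.getD (PySem.Dict.mk t) "quadrant" "q4"
      let eq1 := if (["q1", "q2", "q3", "q4"] : List String).contains eq0 then eq0 else "q4"
      if eq1 ≠ c then b
      else if pvSkip sf t then b
      else b ++ [pvLine t]) [])
    = (ts.filter (fun t => pvEff t == c && !pvSkip sf t)).map pvLine := by
  have h := PySem.List.foldl_congr_mem
    (l := ts) (init := ([] : List String))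
    (f := fun b t =>
      let eq0 := PySem.Dict.getD (PySem.Dict.mk t) "quadrant" "q4"
      let eq1 := if (["q1", "q2", "q3", "q4"] : List String).contains eq0 then eq0 else "q4"
      if eq1 ≠ c then b
      else if pvSkip sf t then b
      else b ++ [pvLine t])
    (g := fun b t => if (pvEff t == c && !pvSkip sf t) then b ++ [pvLine t] else b)
    (by
      intro acc t _
      simp only [pvEff]
      by_cases h1 : (if (["q1", "q2", "q3", "q4"] : List String).contains
          (PySem.Dict.getD (PySem.Dict.mk t) "quadrant" "q4")
          then PySem.Dict.getD (PySem.Dict.mk t) "quadrant" "q4" else "q4") = c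
        <;> by_cases h2 : pvSkip sf t <;> simp [h2])
  rw [h, PySem.List.foldl_append_if]
  simp

lemma buckets_eq (tasks : List (List (String × String))) (sf : Option String) (c : String) :
    (tasks.foldl (fun d t =>
        let q := PySem.Dict.getD (PySem.Dict.mk t) "quadrant" "q4"
        let q := if d.contains q then q else "q4"
        if pvSkip sf t then d
        else d.modify q [] (fun l => l ++ [pvLine t]))
      (PySem.Dict.ofList [("q1", []), ("q2", []), ("q3", []), ("q4", [])])).getD c []
    = (tasks.foldl (fun b t =>
        let eq0 := PySem.Dict.getD (PySem.Dict.mk t) "quadrant" "q4"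
        let eq1 := if (["q1", "q2", "q3", "q4"] : List String).contains eq0 then eq0 else "q4"
        if eq1 ≠ c then b
        else if pvSkip sf t then b
        else b ++ [pvLine t]) []) := by
  rw [loopA_getD sf tasks _ (by decide) c, loopB_bucket sf tasks c]
  by_cases hc : c ∈ (["q1", "q2", "q3", "q4"] : List String)
  · have h0 : (PySem.Dict.ofList [("q1", ([] : List String)), ("q2", []), ("q3", []), ("q4", [])]).getD c [] = [] := by
      fin_cases hc <;> rfl
    rw [h0]; simp
  · -- c is not a quadrant key: both sides are empty
    have h0 : (PySem.Dict.ofList [("q1", ([] : List String)), ("q2", []), ("q3", []), ("q4", [])]).getD c [] = [] := by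
      apply PySem.Dict.getD_of_not_contains
      rw [PySem.Dict.contains_eq_decide_mem_keys]
      have hkeys : (PySem.Dict.ofList [("q1", ([] : List String)), ("q2", []), ("q3", []), ("q4", [])]).keys
          = ["q1", "q2", "q3", "q4"] := by decide
      rw [hkeys]
      simpa using hc
    have h1 : ∀ t, (pvEff t == c) = false := by
      intro t
      simp only [beq_eq_false_iff_ne]
      intro h; exact hc (h ▸ pvEff_mem t)
    simp [h0, h1]

-- ===== VERDICT (by name: the statement is the Claim_ definition above) =====
theorem build_task_text_py_spec : Claim_equal_build_task_text_py := by
  intro tasks sf _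
  unfold Spec_build_task_text_py build_task_text_py build_task_text_py_alt
  simp only [List.foldl_cons, List.foldl_nil]
  rw [buckets_eq tasks sf "q1", buckets_eq tasks sf "q2",
      buckets_eq tasks sf "q3", buckets_eq tasks sf "q4"]
  rfl
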